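-- pv_equiv track=rewrite | github.com/the-omega-institute/automath | theory/2026_golden_ratio_driven_scan_projection_generation_recursive_emergence/scripts/exp_fold_zm_discriminant_ridge_bad_reduction_31_37_audit.py | _poly_divmod_monic_quadratic
-- ===== SOURCE A (Python) =====
-- from typing import Dict, List, Tuple
--
-- def _poly_divmod_monic_quadratic(coeffs: List[int], y0: int, p: int) -> Tuple[List[int], List[int]]:
--     """
--     Divide f(y) by (y-y0)^2 = y^2 - 2y0 y + y0^2 over F_p.
--     Return (quotient, remainder) as coefficient lists low-to-high.
--     """
--     # Ensure working modulo p.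
--     f = [c % p for c in coeffs]
--     # divisor d(y)=y^2 + d1*y + d0 with d1=-2y0, d0=y0^2.
--     d0 = (y0 * y0) % p
--     d1 = (-2 * y0) % p
--
--     # Long division for degrees: deg f = 5, deg d = 2, quotient deg 3.
--     # Work with high-to-low for convenience.
--     deg_f = len(f) - 1
--     q = [0] * (deg_f - 2 + 1)  # degrees 0..3
--     r = f[:]  # mutable remainder (low-to-high)
--
--     def coeff_at(deg: int) -> int:
--         return r[deg] if 0 <= deg < len(r) else 0
--
--     # Since divisor is monic, leading term division is direct.
--     for k in range(deg_f, 1, -1):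
--         # Determine q_{k-2} so that leading term cancels at degree k.
--         lead = coeff_at(k) % p
--         qdeg = k - 2
--         q[qdeg] = lead
--         # Subtract lead * y^{qdeg} * d(y) from r.
--         # r_k -= lead*1, r_{k-1} -= lead*d1, r_{k-2} -= lead*d0.
--         r[k] = (r[k] - lead) % p
--         r[k - 1] = (r[k - 1] - lead * d1) % p
--         r[k - 2] = (r[k - 2] - lead * d0) % p
--
--     # Remainder is degree < 2: r0 + r1*y.
--     rem = [r[0] % p, r[1] % p]
--     # Trim quotient list to length 4.
--     return ([q[i] % p for i in range(0, 4)], rem)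
-- ===== SOURCE B (Python) =====
-- from typing import List, Tuple
--
--
-- def _synth_div(f: List[int], y0: int, p: int) -> Tuple[List[int], int]:
--     """Divide f (coefficients low-to-high) by (y - y0) over F_p.
--
--     Returns (quotient low-to-high, remainder = f(y0) mod p) via Horner's rule.
--     """
--     acc = 0
--     quot = []
--     for c in reversed(f[1:]):  # high coefficients yield quotient entries
--         acc = (acc * y0 + c) % p
--         quot.append(acc)
--     rem = (acc * y0 + f[0]) % p if f else 0
--     quot.reverse()
--     return quot, rem
--
--
-- def _poly_divmod_monic_quadratic(coeffs: List[int], y0: int, p: int) -> Tuple[List[int], List[int]]: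
--     """Divide f(y) by (y-y0)^2 over F_p via two synthetic divisions by (y-y0):
--     f = g*(y-y0) + c, g = q*(y-y0) + d, so f = q*(y-y0)^2 + d*y + (c - d*y0)."""
--     f = [c % p for c in coeffs]
--     g, c = _synth_div(f, y0, p)
--     q, d = _synth_div(g, y0, p)
--     return [q[i] for i in range(0, 4)], [(c - d * y0) % p, d % p]
-- ===== Notes on version B (the rewrite author's own statement) =====
-- stated objective: simpler
-- what changed: Replaced the in-place long division over an index-mutated remainder array by two successive synthetic (Horner) divisions by (y-y0), composing f = q*(y-y0)^2 + d*(y-y0) + c.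
import Mathlib
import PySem

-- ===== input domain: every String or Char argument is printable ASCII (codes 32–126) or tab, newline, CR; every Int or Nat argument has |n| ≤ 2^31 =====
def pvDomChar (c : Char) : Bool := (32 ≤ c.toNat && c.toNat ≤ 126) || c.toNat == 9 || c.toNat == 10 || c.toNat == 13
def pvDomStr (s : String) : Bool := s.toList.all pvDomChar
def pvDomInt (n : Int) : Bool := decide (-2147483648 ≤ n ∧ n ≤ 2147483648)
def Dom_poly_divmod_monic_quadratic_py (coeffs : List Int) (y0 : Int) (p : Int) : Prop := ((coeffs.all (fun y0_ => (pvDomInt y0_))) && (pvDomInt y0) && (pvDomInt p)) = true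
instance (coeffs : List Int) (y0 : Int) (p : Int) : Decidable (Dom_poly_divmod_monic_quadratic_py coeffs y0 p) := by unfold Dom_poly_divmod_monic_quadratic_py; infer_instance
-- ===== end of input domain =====

-- B replaces A's in-place long division over an indexed remainder array by two
-- synthetic (Horner) divisions by (y - y0); objective: simpler.

-- ===== PORT A =====

-- `coeff_at` closure of A
def pvA_coeffAt (r : List Int) (deg : Int) : Int :=
  if 0 ≤ deg ∧ deg < PySem.List.len r then PySem.List.pyGetD r deg 0 else 0

-- the body of A's `for k in range(deg_f, 1, -1)` loop, state = (q, r)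
def pvA_step (d0 d1 p : Int) (st : List Int × List Int) (k : Int) : List Int × List Int :=
  let lead := PySem.Int.mod (pvA_coeffAt st.2 k) p
  let qdeg := k - 2
  let q := PySem.List.pySetD st.1 qdeg lead
  let r := PySem.List.pySetD st.2 k (PySem.Int.mod (PySem.List.pyGetD st.2 k 0 - lead) p)
  let r := PySem.List.pySetD r (k - 1) (PySem.Int.mod (PySem.List.pyGetD r (k - 1) 0 - lead * d1) p)
  let r := PySem.List.pySetD r (k - 2) (PySem.Int.mod (PySem.List.pyGetD r (k - 2) 0 - lead * d0) p)
  (q, r)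

def poly_divmod_monic_quadratic_py (coeffs : List Int) (y0 : Int) (p : Int) : List Int × List Int :=
  let f := coeffs.map (fun c => PySem.Int.mod c p)
  let d0 := PySem.Int.mod (y0 * y0) p
  let d1 := PySem.Int.mod (-2 * y0) p
  let degf : Int := PySem.List.len f - 1
  let q : List Int := List.replicate (degf - 2 + 1).toNat 0
  let st := (PySem.List.pyRange degf 1 (-1)).foldl (pvA_step d0 d1 p) (q, f)
  let rem := [PySem.Int.mod (PySem.List.pyGetD st.2 0 0) p, PySem.Int.mod (PySem.List.pyGetD st.2 1 0) p]
  ((PySem.List.pyRange 0 4 1).map (fun i => PySem.Int.mod (PySem.List.pyGetD st.1 i 0) p), rem)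

-- ===== PORT B =====

-- synthetic division of f (low-to-high) by (y - y0) over F_p: Horner's rule
def pvB_synth_div (f : List Int) (y0 : Int) (p : Int) : List Int × Int :=
  let st := ((PySem.List.slice f (some 1) none).reverse).foldl
    (fun (st : Int × List Int) c =>
      let acc := PySem.Int.mod (st.1 * y0 + c) p
      (acc, st.2 ++ [acc])) ((0 : Int), ([] : List Int))
  let rem := match f with
    | [] => (0 : Int)
    | c0 :: _ => PySem.Int.mod (st.1 * y0 + c0) p
  (st.2.reverse, rem)

def poly_divmod_monic_quadratic_py_alt (coeffs : List Int) (y0 : Int) (p : Int) : List Int × List Int :=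
  let f := coeffs.map (fun c => PySem.Int.mod c p)
  let gc := pvB_synth_div f y0 p
  let qd := pvB_synth_div gc.1 y0 p
  ((PySem.List.pyRange 0 4 1).map (fun i => PySem.List.pyGetD qd.1 i 0),
   [PySem.Int.mod (gc.2 - qd.2 * y0) p, PySem.Int.mod qd.2 p])

-- ===== PRECONDITION & SPEC =====

-- exactly where the Python A (and B) returns: fewer than 6 coefficients raises IndexError, p = 0 raises ZeroDivisionError
def Pre_poly_divmod_monic_quadratic_py (coeffs : List Int) (y0 : Int) (p : Int) : Prop :=
  6 ≤ coeffs.length ∧ p ≠ 0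

instance (coeffs : List Int) (y0 : Int) (p : Int) : Decidable (Pre_poly_divmod_monic_quadratic_py coeffs y0 p) := by
  unfold Pre_poly_divmod_monic_quadratic_py; infer_instance

def pvWitness_poly_divmod_monic_quadratic_py : List Int × Int × Int := ([3, 1, 4, 1, 5, 9], 2, 7)

def Spec_poly_divmod_monic_quadratic_py (coeffs : List Int) (y0 : Int) (p : Int) (out : List Int × List Int) : Prop := out = poly_divmod_monic_quadratic_py_alt coeffs y0 p
instance (coeffs : List Int) (y0 : Int) (p : Int) (out : List Int × List Int) : Decidable (Spec_poly_divmod_monic_quadratic_py coeffs y0 p out) := by unfold Spec_poly_divmod_monic_quadratic_py; infer_instance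

-- ===== CLAIM (what is proved, stated in full; the proofs are below) =====
def Claim_equal_poly_divmod_monic_quadratic_py : Prop := ∀ (coeffs : List Int) (y0 : Int) (p : Int), Dom_poly_divmod_monic_quadratic_py coeffs y0 p → Pre_poly_divmod_monic_quadratic_py coeffs y0 p → Spec_poly_divmod_monic_quadratic_py coeffs y0 p (poly_divmod_monic_quadratic_py coeffs y0 p)


-- ===== LEMMAS AND PROOFS =====

-- ---- modular-arithmetic toolbox (Python's % is Int.fmod) ----

theorem pv_fmod_modEq (a p : Int) : Int.fmod a p ≡ a [ZMOD p] := by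
  unfold Int.ModEq
  rw [Int.fmod_eq_emod]
  split
  · simp
  · rw [Int.add_emod_right]; simp

theorem pv_fmod_congr {p a b : Int} (h : a ≡ b [ZMOD p]) : Int.fmod a p = Int.fmod b p := by
  rw [Int.fmod_eq_emod, Int.fmod_eq_emod, show a % p = b % p from h]
  congr 1
  simp only [Int.dvd_iff_emod_eq_zero, show a % p = b % p from h]

theorem pv_fmod_sub_self (a p : Int) : Int.fmod (a - Int.fmod a p) p = 0 := by
  have h : p ∣ (a - Int.fmod a p) := Int.ModEq.dvd (pv_fmod_modEq a p)
  rcases h with ⟨k, hk⟩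
  rw [Int.fmod_eq_emod, hk]
  simp [Int.mul_emod_right]

-- ---- reference recursions ----

-- Horner scan (high-to-low input): the list of successive accumulators, and the last one
def pvHA (y0 p a0 : Int) : List Int → List Int
  | [] => []
  | c :: t => Int.fmod (a0 * y0 + c) p :: pvHA y0 p (Int.fmod (a0 * y0 + c) p) t

def pvHL (y0 p a0 : Int) : List Int → Int
  | [] => a0
  | c :: t => pvHL y0 p (Int.fmod (a0 * y0 + c) p) t

-- A's loop as structural recursion on the reversed untouched low part,
-- carrying the two "prepped" remainder cells (Av, Bv)
def pvG (d0 d1 p : Int) (Av Bv : Int) : List Int → List Int × Int × Int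
  | [] => ([], Av, Bv)
  | c :: t =>
    let u := Int.fmod Bv p
    let r := pvG d0 d1 p (Int.fmod (c - u * d0) p) (Int.fmod (Av - u * d1) p) t
    (u :: r.1, r.2)

-- the common reference: the quotient-coefficient recurrence on the full
-- high-to-low coefficient stream (last two elements feed the remainder cells)
def pvW (d0 d1 p u3 u2 : Int) : List Int → List Int × Int × Int
  | [] => ([], 0, 0)
  | [_] => ([], 0, 0)
  | [x1, x0] => ([], Int.fmod (x0 - u2 * d0) p,
                     Int.fmod (Int.fmod (x1 - u3 * d0) p - u2 * d1) p)
  | c :: c' :: c'' :: t =>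
    let u := Int.fmod (Int.fmod (c - u3 * d0) p - u2 * d1) p
    let r := pvW d0 d1 p u2 u (c' :: c'' :: t)
    (u :: r.1, r.2)

-- ---- list surgery helpers ----

theorem pv_set_at {α : Type} (xs : List α) (n : Nat) (h : n = xs.length) (y v : α) (ys : List α) : (xs ++ y :: ys).set n v = xs ++ v :: ys := by
  subst h
  induction xs with
  | nil => rfl
  | cons a t ih => simp [ih]

theorem pv_getD_at {α : Type} [Inhabited α] (xs : List α) (n : Nat) (h : n = xs.length) (y : α) (ys : List α) (d : α) : (xs ++ y :: ys).getD n d = y := by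
  subst h
  induction xs with
  | nil => rfl
  | cons a t ih => simpa using ih

-- ---- stage 1: A's fold equals pvG ----

theorem pvA_inv (d0 d1 p : Int) : ∀ (rpre : List Int) (Av Bv : Int) (Q : List Int) (z : Nat),
    (PySem.List.pyRange ((rpre.length : Int) + 1) 1 (-1)).foldl (pvA_step d0 d1 p)
      (List.replicate rpre.length 0 ++ Q, rpre.reverse ++ Av :: Bv :: List.replicate z 0)
    = ((pvG d0 d1 p Av Bv rpre).1.reverse ++ Q,
       (pvG d0 d1 p Av Bv rpre).2.1 :: (pvG d0 d1 p Av Bv rpre).2.2 :: List.replicate (z + rpre.length) 0) := by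
  intro rpre
  induction rpre with
  | nil =>
    intro Av Bv Q z
    rw [show ((List.length ([] : List Int) : Int) + 1) = 1 from by simp,
        PySem.List.pyRange_neg_one_eq_nil (le_refl 1)]
    simp [pvG]
  | cons c t ih =>
    intro Av Bv Q z
    have hL : ((List.length (c :: t) : Int) + 1) = ((t.length + 2 : Nat) : Int) := by
      simp; push_cast; ring
    rw [hL, PySem.List.pyRange_neg_one_cons (by push_cast; omega)]
    simp only [List.foldl_cons]
    have e2 : (((t.length + 2 : Nat) : Int) - 2) = ((t.length : Nat) : Int) := by push_cast; ring
    have e1 : (((t.length + 2 : Nat) : Int) - 1) = ((t.length + 1 : Nat) : Int) := by push_cast; ring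
    have hcond : (0 : Int) ≤ ((t.length + 2 : Nat) : Int) ∧
        ((t.length + 2 : Nat) : Int) < PySem.List.len ((c :: t).reverse ++ Av :: Bv :: List.replicate z 0) := by
      rw [PySem.List.len_eq]
      constructor
      · positivity
      · push_cast; simp; omega
    have hstep : pvA_step d0 d1 p
        (List.replicate (c :: t).length 0 ++ Q, (c :: t).reverse ++ Av :: Bv :: List.replicate z 0)
        ((t.length + 2 : Nat) : Int)
        = (List.replicate t.length 0 ++ Int.fmod Bv p :: Q,
           t.reverse ++ Int.fmod (c - Int.fmod Bv p * d0) p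
             :: Int.fmod (Av - Int.fmod Bv p * d1) p :: List.replicate (z + 1) 0) := by
      simp only [pvA_step, pvA_coeffAt, e1, e2, if_pos hcond,
        PySem.List.pyGetD_natCast, PySem.List.pySetD_natCast, PySem.Int.mod]
      rw [show (c :: t).reverse ++ Av :: Bv :: List.replicate z 0
            = (t.reverse ++ [c] ++ [Av]) ++ Bv :: List.replicate z 0 from by simp,
          pv_getD_at (t.reverse ++ [c] ++ [Av]) (t.length + 2) (by simp),
          pv_set_at (t.reverse ++ [c] ++ [Av]) (t.length + 2) (by simp),
          pv_fmod_sub_self,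
          show (t.reverse ++ [c] ++ [Av]) ++ (0:Int) :: List.replicate z 0
            = (t.reverse ++ [c]) ++ Av :: (0:Int) :: List.replicate z 0 from by simp,
          pv_getD_at (t.reverse ++ [c]) (t.length + 1) (by simp),
          pv_set_at (t.reverse ++ [c]) (t.length + 1) (by simp)]
      rw [show ∀ (X : Int), (t.reverse ++ [c]) ++ X :: (0:Int) :: List.replicate z 0
            = t.reverse ++ c :: X :: (0:Int) :: List.replicate z 0 from fun X => by simp,
          pv_getD_at t.reverse t.length (by simp),
          pv_set_at t.reverse t.length (by simp),
          show List.replicate (c :: t).length (0:Int) ++ Q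
            = List.replicate t.length 0 ++ (0:Int) :: Q from by simp [List.replicate_succ'],
          pv_set_at (List.replicate t.length (0:Int)) t.length (by simp)]
      simp [List.replicate_succ]
    rw [hstep]
    have e3 : (((t.length + 2 : Nat) : Int) - 1) = ((t.length : Int) + 1) := by push_cast; ring
    rw [e3, ih]
    simp only [pvG]
    rw [show z + 1 + t.length = z + (c :: t).length from by simp; omega]
    simp
  

-- ---- stage 2: pvG on prepped cells equals pvW on the full stream ----

theorem pvG_prepped (d0 d1 p : Int) : ∀ (l : List Int) (x w u3 u2 : Int),
    pvG d0 d1 p (Int.fmod (x - u2 * d0) p) (Int.fmod (Int.fmod (w - u3 * d0) p - u2 * d1) p) l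
    = pvW d0 d1 p u3 u2 (w :: x :: l) := by
  intro l
  induction l with
  | nil => intro x w u3 u2; simp [pvG, pvW]
  | cons c t ih =>
    intro x w u3 u2
    simp only [pvG, pvW, Int.fmod_fmod]
    rw [ih]

-- ---- stage 3: B's two Horner passes equal pvW ----

theorem pvKey (y0 p : Int) : ∀ (l : List Int) (α β1 β2 : Int), 2 ≤ l.length →
    α ≡ β1 - y0 * β2 [ZMOD p] →
    pvHA y0 p β1 ((pvHA y0 p α l.dropLast).dropLast)
      = (pvW (Int.fmod (y0 * y0) p) (Int.fmod (-2 * y0) p) p β2 β1 l).1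
    ∧ Int.fmod (pvHL y0 p β1 ((pvHA y0 p α l.dropLast).dropLast) * y0 + (pvHA y0 p α l.dropLast).getLastD 0) p
      = (pvW (Int.fmod (y0 * y0) p) (Int.fmod (-2 * y0) p) p β2 β1 l).2.2
    ∧ Int.fmod (Int.fmod (pvHL y0 p α l.dropLast * y0 + l.getLastD 0) p
        - (pvW (Int.fmod (y0 * y0) p) (Int.fmod (-2 * y0) p) p β2 β1 l).2.2 * y0) p
      = (pvW (Int.fmod (y0 * y0) p) (Int.fmod (-2 * y0) p) p β2 β1 l).2.1 := by
  intro l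
  induction l with
  | nil => intro α β1 β2 h hα; simp at h
  | cons c t ih =>
    intro α β1 β2 h hα
    match t, ih with
    | [], _ => simp at h
    | [x0], _ =>
      -- base case: l = [c, x0]
      clear h ih
      refine ⟨by simp [pvHA, pvW], ?_, ?_⟩
      · -- remainder cell r1
        simp only [pvW, List.dropLast_cons₂, List.dropLast_singleton, pvHA, pvHL, List.getLastD_cons,
          List.getLastD_nil]
        apply pv_fmod_congr
        calc β1 * y0 + Int.fmod (α * y0 + c) p
            ≡ β1 * y0 + (α * y0 + c) [ZMOD p] := Int.ModEq.add_left _ (pv_fmod_modEq _ _)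
          _ ≡ β1 * y0 + ((β1 - y0 * β2) * y0 + c) [ZMOD p] :=
              Int.ModEq.add_left _ (Int.ModEq.add_right _ (hα.mul_right y0))
          _ = (c - β2 * (y0 * y0)) - β1 * (-2 * y0) := by ring
          _ ≡ (c - β2 * Int.fmod (y0 * y0) p) - β1 * Int.fmod (-2 * y0) p [ZMOD p] :=
              Int.ModEq.sub (Int.ModEq.sub (Int.ModEq.refl c)
                ((pv_fmod_modEq _ _).symm.mul_left β2)) ((pv_fmod_modEq _ _).symm.mul_left β1)
          _ ≡ Int.fmod (c - β2 * Int.fmod (y0 * y0) p) p - β1 * Int.fmod (-2 * y0) p [ZMOD p] :=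
              Int.ModEq.sub_right _ (pv_fmod_modEq _ _).symm
      · -- remainder cell r0
        simp only [pvW, List.dropLast_cons₂, List.dropLast_singleton, pvHA, pvHL, List.getLastD_cons,
          List.getLastD_nil]
        apply pv_fmod_congr
        calc Int.fmod (Int.fmod (α * y0 + c) p * y0 + x0) p
              - Int.fmod (Int.fmod (c - β2 * Int.fmod (y0 * y0) p) p - β1 * Int.fmod (-2 * y0) p) p * y0
            ≡ (Int.fmod (α * y0 + c) p * y0 + x0)
              - (Int.fmod (c - β2 * Int.fmod (y0 * y0) p) p - β1 * Int.fmod (-2 * y0) p) * y0 [ZMOD p] :=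
              Int.ModEq.sub (pv_fmod_modEq _ _) ((pv_fmod_modEq _ _).mul_right y0)
          _ ≡ ((α * y0 + c) * y0 + x0)
              - ((c - β2 * (y0 * y0)) - β1 * (-2 * y0)) * y0 [ZMOD p] :=
              Int.ModEq.sub (Int.ModEq.add_right _ ((pv_fmod_modEq _ _).mul_right y0))
                (Int.ModEq.mul_right y0 (Int.ModEq.sub
                  ((pv_fmod_modEq _ _).trans (Int.ModEq.sub (Int.ModEq.refl c)
                    ((pv_fmod_modEq _ _).mul_left β2)))
                  ((pv_fmod_modEq _ _).mul_left β1)))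
          _ ≡ ((β1 - y0 * β2) * y0 * y0 + c * y0 + x0)
              - ((c - β2 * (y0 * y0)) - β1 * (-2 * y0)) * y0 [ZMOD p] := by
              refine Int.ModEq.sub ?_ (Int.ModEq.refl _)
              have := (hα.mul_right y0).mul_right y0
              calc (α * y0 + c) * y0 + x0 = α * y0 * y0 + (c * y0 + x0) := by ring
                _ ≡ (β1 - y0 * β2) * y0 * y0 + (c * y0 + x0) [ZMOD p] := Int.ModEq.add_right _ this
                _ = (β1 - y0 * β2) * y0 * y0 + c * y0 + x0 := by ring
          _ = x0 - β1 * (y0 * y0) := by ring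
          _ ≡ x0 - β1 * Int.fmod (y0 * y0) p [ZMOD p] :=
              Int.ModEq.sub (Int.ModEq.refl x0) ((pv_fmod_modEq _ _).symm.mul_left β1)
    | x0 :: t3 :: t4, ih =>
      -- step case: the tail t = x0 :: t3 :: t4 still has length ≥ 2
      have hb : Int.fmod (β1 * y0 + Int.fmod (α * y0 + c) p) p
          = Int.fmod (Int.fmod (c - β2 * Int.fmod (y0 * y0) p) p - β1 * Int.fmod (-2 * y0) p) p := by
        apply pv_fmod_congr
        calc β1 * y0 + Int.fmod (α * y0 + c) p
            ≡ β1 * y0 + (α * y0 + c) [ZMOD p] := Int.ModEq.add_left _ (pv_fmod_modEq _ _)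
          _ ≡ β1 * y0 + ((β1 - y0 * β2) * y0 + c) [ZMOD p] :=
              Int.ModEq.add_left _ (Int.ModEq.add_right _ (hα.mul_right y0))
          _ = (c - β2 * (y0 * y0)) - β1 * (-2 * y0) := by ring
          _ ≡ (c - β2 * Int.fmod (y0 * y0) p) - β1 * Int.fmod (-2 * y0) p [ZMOD p] :=
              Int.ModEq.sub (Int.ModEq.sub (Int.ModEq.refl c)
                ((pv_fmod_modEq _ _).symm.mul_left β2)) ((pv_fmod_modEq _ _).symm.mul_left β1)
          _ ≡ Int.fmod (c - β2 * Int.fmod (y0 * y0) p) p - β1 * Int.fmod (-2 * y0) p [ZMOD p] :=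
              Int.ModEq.sub_right _ (pv_fmod_modEq _ _).symm
      have hα' : Int.fmod (α * y0 + c) p
          ≡ Int.fmod (β1 * y0 + Int.fmod (α * y0 + c) p) p - y0 * β1 [ZMOD p] := by
        calc Int.fmod (α * y0 + c) p
            ≡ (β1 * y0 + Int.fmod (α * y0 + c) p) - y0 * β1 [ZMOD p] := by
              have h0 : Int.fmod (α * y0 + c) p
                  = (β1 * y0 + Int.fmod (α * y0 + c) p) - y0 * β1 := by ring
              rw [← h0]
          _ ≡ Int.fmod (β1 * y0 + Int.fmod (α * y0 + c) p) p - y0 * β1 [ZMOD p] :=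
              Int.ModEq.sub_right _ (pv_fmod_modEq _ _).symm
      obtain ⟨ih1, ih2, ih3⟩ := ih (Int.fmod (α * y0 + c) p)
        (Int.fmod (β1 * y0 + Int.fmod (α * y0 + c) p) p) β1 (by simp) hα'
      refine ⟨?_, ?_, ?_⟩
      · simp only [pvW, List.dropLast_cons₂, pvHA] at ih1 ⊢
        rw [← hb, ih1]
      · simp only [pvW, List.dropLast_cons₂, pvHA, pvHL, List.getLastD_cons] at ih2 ⊢
        rw [← hb]
        exact ih2
      · simp only [pvW, List.dropLast_cons₂, pvHA, pvHL, List.getLastD_cons] at ih3 ⊢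
        rw [← hb]
        exact ih3

-- ---- small facts about the reference recursions ----

theorem pvW_len (d0 d1 p : Int) : ∀ (l : List Int) (u3 u2 : Int), 2 ≤ l.length →
    (pvW d0 d1 p u3 u2 l).1.length = l.length - 2 := by
  intro l u3 u2 h
  induction u3, u2, l using pvW.induct d0 d1 p with
  | case1 => simp at h
  | case2 => simp at h
  | case3 => simp [pvW]
  | case4 u3 u2 c c' c'' t u ih =>
    show (u :: (pvW d0 d1 p u2 u (c' :: c'' :: t)).1).length = (c :: c' :: c'' :: t).length - 2
    have h2 : (pvW d0 d1 p u2 u (c' :: c'' :: t)).1.length = t.length :=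
      (ih (by simp)).trans (show (c' :: c'' :: t).length - 2 = t.length from by simp)
    simp [h2]

theorem pvW_reduced (d0 d1 p : Int) : ∀ (l : List Int) (u3 u2 : Int) (v : Int),
    v ∈ (pvW d0 d1 p u3 u2 l).1 → Int.fmod v p = v := by
  intro l u3 u2 v hv
  induction u3, u2, l using pvW.induct d0 d1 p with
  | case1 => simp [pvW] at hv
  | case2 => simp [pvW] at hv
  | case3 => simp [pvW] at hv
  | case4 u3 u2 c c' c'' t u ih =>
    simp only [pvW, List.mem_cons] at hv
    rcases hv with h | h
    · subst h; exact Int.fmod_fmod _ _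
    · exact ih h

theorem pvW_rem_reduced (d0 d1 p : Int) : ∀ (l : List Int) (u3 u2 : Int), 2 ≤ l.length →
    Int.fmod (pvW d0 d1 p u3 u2 l).2.1 p = (pvW d0 d1 p u3 u2 l).2.1
    ∧ Int.fmod (pvW d0 d1 p u3 u2 l).2.2 p = (pvW d0 d1 p u3 u2 l).2.2 := by
  intro l u3 u2 h
  induction u3, u2, l using pvW.induct d0 d1 p with
  | case1 => simp at h
  | case2 => simp at h
  | case3 => simp [pvW, Int.fmod_fmod]
  | case4 u3 u2 c c' c'' t u ih =>
    simp only [pvW]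
    exact ih (by simp)

-- B's fold characterized by pvHA / pvHL
theorem pvB_fold (y0 p : Int) : ∀ (hs : List Int) (a0 : Int) (acc : List Int),
    hs.foldl (fun (st : Int × List Int) c =>
      (Int.fmod (st.1 * y0 + c) p, st.2 ++ [Int.fmod (st.1 * y0 + c) p])) (a0, acc)
    = (pvHL y0 p a0 hs, acc ++ pvHA y0 p a0 hs) := by
  intro hs
  induction hs with
  | nil => intro a0 acc; simp [pvHA, pvHL]
  | cons c t ih =>
    intro a0 acc
    simp only [List.foldl_cons, ih]
    simp [pvHA, pvHL]

theorem pvHA_len (y0 p : Int) : ∀ (hs : List Int) (a0 : Int), (pvHA y0 p a0 hs).length = hs.length := by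
  intro hs
  induction hs with
  | nil => intro a0; rfl
  | cons c t ih => intro a0; simp [pvHA, ih]

-- ===== VERDICT (by name: the statement is the Claim_ definition above) =====
theorem poly_divmod_monic_quadratic_py_spec : Claim_equal_poly_divmod_monic_quadratic_py := by
  unfold Claim_equal_poly_divmod_monic_quadratic_py
  intro coeffs y0 p _ hPre
  obtain ⟨hlen, hp⟩ := hPre
  unfold Spec_poly_divmod_monic_quadratic_py
  match coeffs, hlen with
  | a0 :: arest, hlen =>
  have hlen5 : 5 ≤ arest.length := by simp at hlen; omega
  simp only [poly_divmod_monic_quadratic_py, poly_divmod_monic_quadratic_py_alt,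
    pvB_synth_div, PySem.Int.mod, PySem.List.len_eq, PySem.List.slice_from_one,
    List.map_cons, List.tail_cons]
  generalize hc0 : Int.fmod a0 p = c0
  generalize hcrest : List.map (fun c => Int.fmod c p) arest = crest
  -- facts about the reduced coefficient list c0 :: crest
  have hlc : crest.length = arest.length := by rw [← hcrest]; simp
  have hred : ∀ v ∈ c0 :: crest, Int.fmod v p = v := by
    intro v hv
    rcases List.mem_cons.mp hv with h | h
    · rw [h, ← hc0, Int.fmod_fmod]
    · rw [← hcrest] at h
      simp only [List.mem_map] at h
      obtain ⟨c, _, hc⟩ := h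
      rw [← hc, Int.fmod_fmod]
  obtain ⟨w, x, ysrev, hrev⟩ : ∃ w x ysrev, (c0 :: crest).reverse = w :: x :: ysrev := by
    match hR : (c0 :: crest).reverse,
        (show 2 ≤ (c0 :: crest).reverse.length from by simp; omega) with
    | w :: x :: ysrev, _ => exact ⟨w, x, ysrev, rfl⟩
  have hFys : c0 :: crest = ysrev.reverse ++ [x, w] := by
    rw [← List.reverse_reverse (c0 :: crest), hrev]; simp
  have hx : Int.fmod x p = x := hred x (by rw [hFys]; simp)
  have hw : Int.fmod w p = w := hred w (by rw [hFys]; simp)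
  have hlys : ysrev.length + 2 = arest.length + 1 := by
    have := congrArg List.length hFys
    simp at this
    omega
  -- ===== A side =====
  have hA : (PySem.List.pyRange (((c0 :: crest).length : Int) - 1) 1 (-1)).foldl
        (pvA_step (Int.fmod (y0 * y0) p) (Int.fmod (-2 * y0) p) p)
        (List.replicate (((c0 :: crest).length : Int) - 1 - 2 + 1).toNat 0, c0 :: crest)
      = ((pvG (Int.fmod (y0 * y0) p) (Int.fmod (-2 * y0) p) p x w ysrev).1.reverse,
         (pvG (Int.fmod (y0 * y0) p) (Int.fmod (-2 * y0) p) p x w ysrev).2.1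
           :: (pvG (Int.fmod (y0 * y0) p) (Int.fmod (-2 * y0) p) p x w ysrev).2.2
           :: List.replicate (ysrev.length) 0) := by
    have e2 : (((c0 :: crest).length : Int) - 1 - 2 + 1).toNat = ysrev.length := by
      simp; omega
    have e1 : (((c0 :: crest).length : Int) - 1) = ((ysrev.length : Int) + 1) := by
      simp; push_cast; omega
    have e3 : c0 :: crest = ysrev.reverse ++ x :: w :: List.replicate 0 0 := by
      rw [hFys]; simp
    have h0 := pvA_inv (Int.fmod (y0 * y0) p) (Int.fmod (-2 * y0) p) p ysrev x w [] 0
    simp only [List.append_nil, Nat.zero_add] at h0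
    rw [e2, e1, e3]
    exact h0
  have hGW : pvG (Int.fmod (y0 * y0) p) (Int.fmod (-2 * y0) p) p x w ysrev
      = pvW (Int.fmod (y0 * y0) p) (Int.fmod (-2 * y0) p) p 0 0 (c0 :: crest).reverse := by
    have h0 := pvG_prepped (Int.fmod (y0 * y0) p) (Int.fmod (-2 * y0) p) p ysrev x w 0 0
    simp only [zero_mul, sub_zero, hx, hw] at h0
    rw [← hrev] at h0
    exact h0
  -- ===== the shared reference =====
  obtain ⟨k1, k2, k3⟩ := pvKey y0 p (c0 :: crest).reverse 0 0 0
    (by simp; omega) (by simpa using Int.ModEq.refl 0)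
  have hdrop : (c0 :: crest).reverse.dropLast = crest.reverse := by
    simp
  have hgl : (c0 :: crest).reverse.getLastD 0 = c0 := by
    simp
  rw [hdrop] at k1 k2 k3
  rw [hgl] at k3
  -- ===== B side plumbing =====
  obtain ⟨g0, grest, hg⟩ : ∃ g0 grest, (pvHA y0 p 0 crest.reverse).reverse = g0 :: grest := by
    match hGr : (pvHA y0 p 0 crest.reverse).reverse,
        (show (pvHA y0 p 0 crest.reverse).reverse ≠ [] from by
          intro hnil
          have h9 : (pvHA y0 p 0 crest.reverse).reverse.length = 0 := by rw [hnil]; rfl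
          rw [List.length_reverse, pvHA_len, List.length_reverse] at h9
          omega) with
    | g0 :: grest, _ => exact ⟨g0, grest, rfl⟩
  have hgLast : (pvHA y0 p 0 crest.reverse).getLastD 0 = g0 := by
    rw [← List.reverse_reverse (pvHA y0 p 0 crest.reverse), hg]
    simp
  have hgDrop : grest.reverse = (pvHA y0 p 0 crest.reverse).dropLast := by
    rw [← List.reverse_reverse (pvHA y0 p 0 crest.reverse), hg]
    simp
  -- ===== assemble =====
  rw [hA, hGW]
  simp only [pvB_fold, List.nil_append, hg, List.tail_cons]
  rw [hgDrop]
  rw [← hgLast, k1, k2, k3]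
  -- remaining: the two final output lists
  have hrem := pvW_rem_reduced (Int.fmod (y0 * y0) p) (Int.fmod (-2 * y0) p) p
    (c0 :: crest).reverse 0 0 (by simp; omega)
  have hWlen : (pvW (Int.fmod (y0 * y0) p) (Int.fmod (-2 * y0) p) p 0 0 (c0 :: crest).reverse).1.length
      = crest.length - 1 := by
    rw [pvW_len _ _ _ _ _ _ (by simp; omega)]
    simp
  obtain ⟨e0, e1, e2, e3, erest, hE⟩ : ∃ e0 e1 e2 e3 erest,
      (pvW (Int.fmod (y0 * y0) p) (Int.fmod (-2 * y0) p) p 0 0 (c0 :: crest).reverse).1.reverse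
        = e0 :: e1 :: e2 :: e3 :: erest := by
    match hEr : (pvW (Int.fmod (y0 * y0) p) (Int.fmod (-2 * y0) p) p 0 0 (c0 :: crest).reverse).1.reverse,
        (show 4 ≤ (pvW (Int.fmod (y0 * y0) p) (Int.fmod (-2 * y0) p) p 0 0 (c0 :: crest).reverse).1.reverse.length from by
          rw [List.length_reverse, hWlen]; omega) with
    | e0 :: e1 :: e2 :: e3 :: erest, _ => exact ⟨e0, e1, e2, e3, erest, rfl⟩
  have hmem : ∀ v ∈ (pvW (Int.fmod (y0 * y0) p) (Int.fmod (-2 * y0) p) p 0 0 (c0 :: crest).reverse).1.reverse,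
      Int.fmod v p = v := by
    intro v hv
    exact pvW_reduced _ _ _ _ _ _ v (List.mem_reverse.mp hv)
  have he0 := hmem e0 (by rw [hE]; simp)
  have he1 := hmem e1 (by rw [hE]; simp)
  have he2 := hmem e2 (by rw [hE]; simp)
  have he3 := hmem e3 (by rw [hE]; simp)
  have hr4 : PySem.List.pyRange 0 4 1 = [0, 1, 2, 3] := by decide
  rw [hE, hr4]
  simp only [List.map_cons, List.map_nil, PySem.List.pyGetD_ofNat',
    List.getD_cons_succ, List.getD_cons_zero, hrem.1, hrem.2, he0, he1, he2, he3]
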